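-- pv_equiv track=rewrite | github.com/leihchen/leetcode | mac/2022/tiktok.py | costum_sort
-- ===== SOURCE A (Python) =====
-- def costum_sort(nums):
--     n = len(nums)
--     left, right = 0, n-1
--     res = 0
--     while left < right:
--         if nums[left] % 2 == 1:
--             while nums[right] % 2 == 1 and left < right:
--                 right -= 1
--             if left >= right:
--                 break
--             res += 1
--         left += 1
--     return res
-- ===== SOURCE B (Python) =====
-- def costum_sort(nums):
--     # two directional scans instead of a two-pointer while loop
--     t = 0
--     for x in reversed(nums):
--         if x % 2 != 1:
--             break
--         t += 1
--     cut = max(len(nums) - 1 - t, 0)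
--     return sum(1 for x in nums[:cut] if x % 2 == 1)
-- ===== Notes on version B (the rewrite author's own statement) =====
-- stated objective: simpler
-- what changed: Replaces the interleaved two-pointer while-loop with two independent directional scans: a backward scan counting the trailing odd run to find the cut index, then a forward count of odd elements in the prefix before the cut.
import Mathlib
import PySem

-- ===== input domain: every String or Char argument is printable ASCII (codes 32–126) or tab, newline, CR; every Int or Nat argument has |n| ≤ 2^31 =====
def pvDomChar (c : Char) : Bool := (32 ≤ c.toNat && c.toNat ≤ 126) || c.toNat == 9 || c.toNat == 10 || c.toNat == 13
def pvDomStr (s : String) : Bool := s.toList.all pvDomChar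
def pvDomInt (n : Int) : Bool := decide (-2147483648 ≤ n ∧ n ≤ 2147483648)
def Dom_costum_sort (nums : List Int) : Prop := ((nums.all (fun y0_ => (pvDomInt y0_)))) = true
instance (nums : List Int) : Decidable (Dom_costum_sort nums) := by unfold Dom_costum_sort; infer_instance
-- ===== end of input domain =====

-- B replaces A's interleaved two-pointer loop by two independent directional scans
-- (trailing-odd run, then a prefix count of odds); same O(n) cost, plainer structure.

-- ===== PORT A =====
-- Python's 'x % 2 == 1' test (Python % floors: exact for negative x too).
def pvOdd (x : Int) : Bool := PySem.Int.mod x 2 == 1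

-- inner 'while nums[right] % 2 == 1 and left < right: right -= 1'.
-- Indices are always in range 0 ≤ right ≤ n-1, so 'nums.getD right 0' is Python's nums[right].
def pvSkip (nums : List Int) (left right : Nat) : Nat :=
  if h : pvOdd (nums.getD right 0) = true ∧ left < right then
    pvSkip nums left (right - 1)
  else right
termination_by right
decreasing_by omega

-- pvSkip never moves right below 'right' (needed for pvOuter's termination)
theorem pvSkip_le (nums : List Int) : ∀ right left, pvSkip nums left right ≤ right := by
  intro right
  induction right using Nat.strongRecOn with
  | ind right ih =>
    intro left
    rw [pvSkip]
    split
    · rename_i h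
      obtain ⟨ho, hlt⟩ := h
      exact le_trans (ih (right - 1) (by omega) left) (by omega)
    · exact le_refl _

-- the outer while loop; state (left, right, res)
def pvOuter (nums : List Int) (left right : Nat) (res : Int) : Int :=
  if h : left < right then
    if pvOdd (nums.getD left 0) = true then
      let r' := pvSkip nums left right
      if left ≥ r' then res
      else pvOuter nums (left + 1) r' (res + 1)
    else pvOuter nums (left + 1) right res
  else res
termination_by right - left
decreasing_by
  · have := pvSkip_le nums right left
    omega
  · omega

-- Python sets right = n-1 (as int); for n = 0 the loop body never runs either way,
-- so the Nat truncation n-1 = 0 is exact.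
def costum_sort (nums : List Int) : Int := pvOuter nums 0 (nums.length - 1) 0

-- ===== PORT B =====
-- 'for x in reversed(nums): if x % 2 != 1: break; t += 1'
def pvTrail : List Int → Nat
  | [] => 0
  | x :: xs => if pvOdd x then pvTrail xs + 1 else 0

-- 'sum(1 for x in nums[:cut] if x % 2 == 1)' ported as filter-length
def costum_sort_alt (nums : List Int) : Int :=
  let t := pvTrail nums.reverse
  let cut : Int := max ((nums.length : Int) - 1 - (t : Int)) 0
  (((PySem.List.slice nums none (some cut)).filter (fun x => pvOdd x)).length : Int)

-- ===== PRECONDITION & SPEC =====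
def Spec_costum_sort (nums : List Int) (out : Int) : Prop := out = costum_sort_alt nums
instance (nums : List Int) (out : Int) : Decidable (Spec_costum_sort nums out) := by unfold Spec_costum_sort; infer_instance

-- ===== CLAIM (what is proved, stated in full; the proofs are below) =====
def Claim_equal_costum_sort : Prop := ∀ (nums : List Int), Dom_costum_sort nums → Spec_costum_sort nums (costum_sort nums)

-- ===== LEMMAS AND PROOFS =====

-- oddness of the element at index i
def pvOddAt (nums : List Int) (i : Nat) : Bool := pvOdd (nums.getD i 0)

-- number of odd elements at indices in [a, b)
def pvCnt (nums : List Int) (a b : Nat) : Nat :=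
  ((List.range' a (b - a)).filter (fun i => pvOddAt nums i)).length

theorem pvCnt_zero (nums : List Int) (a b : Nat) (h : b ≤ a) : pvCnt nums a b = 0 := by
  unfold pvCnt
  have : b - a = 0 := by omega
  simp [this]

theorem pvCnt_step (nums : List Int) (a b : Nat) (h : a < b) :
    pvCnt nums a b = (if pvOddAt nums a then 1 else 0) + pvCnt nums (a + 1) b := by
  unfold pvCnt
  have hba : b - a = (b - (a + 1)) + 1 := by omega
  rw [hba, List.range'_succ]
  simp only [List.filter_cons]
  split
  · simp [Nat.add_comm]
  · simp

theorem pvSkip_ge (nums : List Int) : ∀ right left, left ≤ right → left ≤ pvSkip nums left right := by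
  intro right
  induction right using Nat.strongRecOn with
  | ind right ih =>
    intro left hlr
    rw [pvSkip]
    split
    · rename_i h
      obtain ⟨ho, hlt⟩ := h
      exact ih (right - 1) (by omega) left (by omega)
    · exact hlr

-- stopping condition: the landing index is even, or at/below left
theorem pvSkip_stop (nums : List Int) :
    ∀ right left, pvOddAt nums (pvSkip nums left right) = false ∨ pvSkip nums left right ≤ left := by
  intro right
  induction right using Nat.strongRecOn with
  | ind right ih =>
    intro left
    rw [pvSkip]
    split
    · rename_i h
      obtain ⟨ho, hlt⟩ := h
      exact ih (right - 1) (by omega) left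
    · rename_i h
      rcases Decidable.em (pvOdd (nums.getD right 0) = true) with ho | ho
      · right
        by_contra hc
        exact h ⟨ho, by omega⟩
      · left
        unfold pvOddAt
        simpa using ho

-- everything strictly above the landing index (up to right) is odd
theorem pvSkip_above (nums : List Int) :
    ∀ right left j, pvSkip nums left right < j → j ≤ right → pvOddAt nums j = true := by
  intro right
  induction right using Nat.strongRecOn with
  | ind right ih =>
    intro left j h1 h2
    rw [pvSkip] at h1
    split at h1
    · rename_i h
      obtain ⟨ho, hlt⟩ := h
      rcases Decidable.em (j = right) with rfl | hne
      · exact ho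
      · exact ih (right - 1) (by omega) left j h1 (by omega)
    · omega

-- pvSkip lands at e if e ≤ left or e is even, and everything in (e, e+k] is odd
theorem pvSkip_eq (nums : List Int) (left e : Nat) :
    ∀ k, left ≤ e → (pvOddAt nums e = false ∨ e ≤ left) →
      (∀ j, e < j → j ≤ e + k → pvOddAt nums j = true) →
      pvSkip nums left (e + k) = e := by
  intro k
  induction k with
  | zero =>
    intro hle hstop _
    rw [pvSkip]
    split
    · rename_i hcond
      exfalso
      obtain ⟨h1, h2⟩ := hcond
      rcases hstop with hodd | hel
      · unfold pvOddAt at hodd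
        rw [Nat.add_zero] at h1
        rw [h1] at hodd
        simp at hodd
      · omega
    · omega
  | succ k ih =>
    intro hle hstop hodd
    rw [pvSkip, dif_pos ⟨hodd (e + (k + 1)) (by omega) (by omega), by omega⟩]
    have he : e + (k + 1) - 1 = e + k := by omega
    rw [he]
    exact ih hle hstop (fun j h1 h2 => hodd j h1 (by omega))

-- if the landing index is above left, raising left by one does not change it
theorem pvSkip_shift (nums : List Int) :
    ∀ right left, left + 1 ≤ pvSkip nums left right →
      pvSkip nums (left + 1) right = pvSkip nums left right := by
  intro right
  induction right using Nat.strongRecOn with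
  | ind right ih =>
    intro left hv
    rcases Decidable.em (pvOdd (nums.getD right 0) = true) with ho | ho
    · rcases Decidable.em (left + 1 < right) with hlt | hlt
      · have e1 : pvSkip nums left right = pvSkip nums left (right - 1) := by
          rw [pvSkip, dif_pos ⟨ho, by omega⟩]
        have e2 : pvSkip nums (left + 1) right = pvSkip nums (left + 1) (right - 1) := by
          rw [pvSkip, dif_pos ⟨ho, hlt⟩]
        rw [e1, e2]
        exact ih (right - 1) (by omega) left (by rw [← e1]; exact hv)
      · exfalso
        rcases Decidable.em (left < right) with hl | hl
        · have hr : right = left + 1 := by omega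
          have e1 : pvSkip nums left right = left := by
            rw [pvSkip, dif_pos ⟨ho, hl⟩, hr]
            simp only [Nat.add_sub_cancel]
            rw [pvSkip, dif_neg (by intro hc; omega)]
          omega
        · have e1 : pvSkip nums left right = right := by
            rw [pvSkip, dif_neg (by intro hc; exact hl hc.2)]
          omega
    · rw [pvSkip, dif_neg (by intro hc; exact ho hc.1)]
      rw [pvSkip, dif_neg (by intro hc; exact ho hc.1)]

-- main invariant of the outer loop
theorem pvOuter_eq (nums : List Int) :
    ∀ d left right res, right - left ≤ d →
      pvOuter nums left right res = res + (pvCnt nums left (pvSkip nums left right) : Int) := by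
  intro d
  induction d with
  | zero =>
    intro left right res h
    rw [pvOuter, dif_neg (by omega)]
    have hsk : pvSkip nums left right = right := by
      rw [pvSkip, dif_neg (by intro hc; omega)]
    rw [hsk, pvCnt_zero nums left right (by omega)]
    simp
  | succ d ih =>
    intro left right res h
    rcases Decidable.em (left < right) with hlr | hlr
    · rw [pvOuter, dif_pos hlr]
      set v := pvSkip nums left right with hvdef
      have hvle : v ≤ right := pvSkip_le nums right left
      have hvge : left ≤ v := pvSkip_ge nums right left (by omega)
      rcases Decidable.em (pvOdd (nums.getD left 0) = true) with hol | hol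
      · rw [if_pos hol]
        rcases Decidable.em (left ≥ v) with hge | hge
        · rw [if_pos hge]
          have : v = left := by omega
          rw [this, pvCnt_zero nums left left (le_refl _)]
          simp
        · rw [if_neg hge]
          have hlv : left + 1 ≤ v := by omega
          -- pvSkip (left+1) v = v since nums[v] is even
          have hveven : pvOddAt nums v = false := by
            rcases pvSkip_stop nums right left with h' | h'
            · exact h'
            · omega
          have hskv : pvSkip nums (left + 1) v = v := by
            rw [pvSkip, dif_neg]
            intro hc
            unfold pvOddAt at hveven
            rw [hveven] at hc
            exact absurd hc.1 (by simp)
          rw [ih (left + 1) v (res + 1) (by omega), hskv]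
          have holAt : pvOddAt nums left = true := hol
          rw [pvCnt_step nums left v (by omega), holAt]
          simp only [if_true]
          push_cast
          ring
      · rw [if_neg hol]
        rw [ih (left + 1) right res (by omega)]
        set v' := pvSkip nums (left + 1) right with hv'def
        rcases Decidable.em (left + 1 ≤ v) with hc | hc
        · have hvv : v' = v := by rw [hv'def, hvdef]; exact pvSkip_shift nums right left hc
          have holAt : pvOddAt nums left = false := Bool.eq_false_iff.mpr hol
          rw [hvv, pvCnt_step nums left v (by omega), holAt]
          simp
        · -- v = left: everything in (left, right] is odd, so v' = left + 1
          have hv : v = left := by omega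
          have hodds : ∀ j, left < j → j ≤ right → pvOddAt nums j = true := by
            intro j h1 h2
            exact pvSkip_above nums right left j (by omega) h2
          have hv' : v' = left + 1 := by
            rw [hv'def]
            have hr : right = (left + 1) + (right - (left + 1)) := by omega
            rw [hr]
            exact pvSkip_eq nums (left + 1) (left + 1) (right - (left + 1)) (le_refl _)
              (Or.inr (le_refl _))
              (fun j h1 h2 => hodds j (by omega) (by omega))
          rw [hv', hv, pvCnt_zero nums left left (le_refl _),
              pvCnt_zero nums (left + 1) (left + 1) (le_refl _)]
    · rw [pvOuter, dif_neg hlr]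
      have hsk : pvSkip nums left right = right := by
        rw [pvSkip, dif_neg (by intro hc; omega)]
      rw [hsk, pvCnt_zero nums left right (by omega)]
      simp

-- pvTrail facts
theorem pvTrail_le : ∀ l : List Int, pvTrail l ≤ l.length := by
  intro l
  induction l with
  | nil => simp [pvTrail]
  | cons x xs ih =>
    rw [pvTrail]
    split
    · simpa using ih
    · simp

theorem pvTrail_odd : ∀ (l : List Int) (i : Nat), i < pvTrail l → pvOdd (l.getD i 0) = true := by
  intro l
  induction l with
  | nil => intro i h; simp [pvTrail] at h
  | cons x xs ih =>
    intro i h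
    rw [pvTrail] at h
    split at h
    · rename_i hx
      cases i with
      | zero => simpa using hx
      | succ i => exact ih i (by omega)
    · omega

theorem pvTrail_even : ∀ l : List Int, pvTrail l < l.length → pvOdd (l.getD (pvTrail l) 0) = false := by
  intro l
  induction l with
  | nil => intro h; simp at h
  | cons x xs ih =>
    intro h
    rw [pvTrail] at h ⊢
    split at h
    · rename_i hx
      rw [if_pos hx]
      exact ih (by simpa using h)
    · rename_i hx
      rw [if_neg hx]
      simpa using hx

-- getD through reverse
theorem getD_reverse (nums : List Int) (i : Nat) (hi : i < nums.length) :
    nums.reverse.getD i 0 = nums.getD (nums.length - 1 - i) 0 := by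
  rw [List.getD_eq_getElem?_getD, List.getD_eq_getElem?_getD]
  rw [List.getElem?_reverse (by simpa using hi)]

-- prefix count: pvCnt 0 b equals filter-length of the first b elements
theorem pvCnt_take (nums : List Int) :
    ∀ b, b ≤ nums.length →
      pvCnt nums 0 b = ((nums.take b).filter (fun x => pvOdd x)).length := by
  intro b
  induction b with
  | zero => intro _; rw [pvCnt_zero nums 0 0 (le_refl _)]; simp
  | succ b ih =>
    intro h
    unfold pvCnt at ih ⊢
    simp only [Nat.sub_zero] at ih ⊢
    rw [List.range'_concat, List.take_add_one, List.filter_append, List.filter_append,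
        List.length_append, List.length_append, ih (by omega)]
    congr 1
    have hb : b < nums.length := by omega
    rw [List.getElem?_eq_getElem hb]
    simp only [Nat.one_mul, Nat.zero_add, Option.toList_some, List.filter_cons,
      List.filter_nil]
    unfold pvOddAt
    rw [List.getD_eq_getElem?_getD, List.getElem?_eq_getElem hb]
    simp only [Option.getD_some]
    split <;> simp

-- costum_sort_alt with its lets unfolded
theorem alt_eq (nums : List Int) :
    costum_sort_alt nums =
      (((PySem.List.slice nums none
          (some (max ((nums.length : Int) - 1 - (pvTrail nums.reverse : Int)) 0))).filter
        (fun x => pvOdd x)).length : Int) := rfl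

-- characterize pvSkip from index 0 via the trailing odd run
theorem final_eq (nums : List Int) : costum_sort nums = costum_sort_alt nums := by
  rw [show costum_sort nums = pvOuter nums 0 (nums.length - 1) 0 from rfl, alt_eq]
  set n := nums.length with hn
  set t := pvTrail nums.reverse with ht
  have htle : t ≤ n := by
    have := pvTrail_le nums.reverse
    simpa [hn] using this
  rw [pvOuter_eq nums (n - 1) 0 (n - 1) 0 (le_refl _)]
  have hodds : ∀ j, n - 1 - t < j → j ≤ n - 1 → pvOddAt nums j = true := by
    intro j h1 h2
    have hj : j < n := by omega
    have h' := pvTrail_odd nums.reverse (n - 1 - j) (by simp only [← ht]; omega)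
    rw [getD_reverse nums (n - 1 - j) (by simp [hn]; omega)] at h'
    unfold pvOddAt
    simp only [hn] at h'
    have hjj : n - 1 - (n - 1 - j) = j := by omega
    rwa [hjj] at h'
  rcases Decidable.em (t = n) with htn | htn
  · -- all elements odd (or empty): skip lands at 0, both sides are 0
    have hsk : pvSkip nums 0 (n - 1) = 0 := by
      rcases Nat.eq_zero_or_pos n with h0 | h0
      · rw [pvSkip, dif_neg (by intro hc; omega)]
        omega
      · have := pvSkip_eq nums 0 0 (n - 1) (le_refl _) (Or.inr (le_refl _))
          (fun j h1 h2 => hodds j (by omega) (by omega))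
        simpa using this
    rw [hsk, pvCnt_zero nums 0 0 (le_refl _)]
    have hcut : max ((n : Int) - 1 - (t : Int)) 0 = ((0 : Nat) : Int) := by
      rw [htn]; push_cast; omega
    rw [hcut, PySem.List.slice_to_natCast nums 0]
    simp
  · -- t < n: skip lands at e = n - 1 - t, which holds an even element
    have htlt : t < n := by omega
    have heven : pvOddAt nums (n - 1 - t) = false := by
      have h' := pvTrail_even nums.reverse (by simpa [hn] using htlt)
      rw [getD_reverse nums t (by simpa [hn] using htlt)] at h'
      unfold pvOddAt
      simpa [hn] using h'
    have hsk : pvSkip nums 0 (n - 1) = n - 1 - t := by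
      have h' := pvSkip_eq nums 0 (n - 1 - t) t (by omega) (Or.inl heven)
        (fun j h1 h2 => hodds j h1 (by omega))
      have hk : n - 1 - t + t = n - 1 := by omega
      rwa [hk] at h'
    rw [hsk]
    have hcut : max ((n : Int) - 1 - (t : Int)) 0 = ((n - 1 - t : Nat) : Int) := by
      push_cast [Nat.sub_sub]
      omega
    rw [hcut, PySem.List.slice_to_natCast nums (n - 1 - t),
        pvCnt_take nums (n - 1 - t) (by omega)]
    simp

-- ===== VERDICT (by name: the statement is the Claim_ definition above) =====
theorem costum_sort_spec : Claim_equal_costum_sort := by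
  intro nums _
  unfold Spec_costum_sort
  exact final_eq nums
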